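-- pv_equiv track=rewrite | github.com/Caddickbrown/Tourminal | daily_journal_customtkinter.py | extract_tags_from_end_of_content
-- ===== SOURCE A (Python) =====
-- def extract_tags_from_end_of_content(content):
--     """Extract tags from the end of content in @tag format"""
--     if not content:
--         return ""
--
--     lines = content.split('\n')
--     tags = []
--
--     # Look for @tags at the end of the content
--     for line in reversed(lines):
--         line = line.strip()
--         if not line:
--             continue
--
--         # Check if this line contains @tags
--         words = line.split()
--         line_tags = []
--         for word in words:
--             if word.startswith('@'):
--                 tag = word[1:].rstrip('.,;:!?')
--                 if tag and any(c.isalnum() for c in tag):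
--                     line_tags.append(tag.lower())
--
--         if line_tags:
--             # Found tags, add them and stop looking
--             tags.extend(reversed(line_tags))  # Reverse to maintain order
--             break
--         elif line.startswith('#'):
--             # Found a header, stop looking
--             break
--         else:
--             # This line doesn't contain tags, stop looking
--             break
--
--     return ", ".join(reversed(tags))  # Reverse again to get original order
-- ===== SOURCE B (Python) =====
-- def _last_nonempty_line(content):
--     last = ""
--     for raw in content.split('\n'):
--         stripped = raw.strip()
--         if stripped:
--             last = stripped
--     return last
--
--
-- def _tag_of(word):
--     if not word.startswith('@'):
--         return None
--     tag = word[1:].rstrip('.,;:!?')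
--     if tag and any(c.isalnum() for c in tag):
--         return tag.lower()
--     return None
--
--
-- def extract_tags_from_end_of_content(content):
--     line = _last_nonempty_line(content)
--     return ", ".join(t for t in map(_tag_of, line.split()) if t is not None)
-- ===== Notes on version B (the rewrite author's own statement) =====
-- stated objective: simpler
-- what changed: B replaces A's reverse-scan with break/continue state machine and its cancelling double-reverse by a forward fold that keeps the last non-empty stripped line, then extracts tags from that one line with a single filter-map; the header/else branches disappear because they all yield the empty result.
import Mathlib
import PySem

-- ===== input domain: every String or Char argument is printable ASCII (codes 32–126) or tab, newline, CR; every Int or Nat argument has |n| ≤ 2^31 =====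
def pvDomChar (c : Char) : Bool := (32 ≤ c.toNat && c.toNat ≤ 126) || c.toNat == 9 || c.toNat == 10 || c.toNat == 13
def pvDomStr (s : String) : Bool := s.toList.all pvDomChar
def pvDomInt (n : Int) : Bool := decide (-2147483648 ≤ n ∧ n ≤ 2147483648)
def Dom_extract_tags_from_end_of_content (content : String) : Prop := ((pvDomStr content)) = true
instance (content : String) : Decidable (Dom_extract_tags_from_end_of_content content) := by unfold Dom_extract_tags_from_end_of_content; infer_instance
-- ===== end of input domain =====

-- B locates the last non-empty line with one forward fold and extracts its tags with a
-- single filter-map, dropping A's reverse scan, break/else machinery and double reverse (objective: simpler).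

-- shared helper: Python's word.rstrip('.,;:!?') — drop trailing chars of that set (exact: rstrip
-- with an explicit char set removes exactly the maximal trailing run of those chars)
-- content.split('\n'): sep is the non-empty literal "\n", so split? never returns none (exact)
def pvSplitNL (s : String) : List String := (PySem.Str.split? s "\n").getD []

def pvIsPunct (c : Char) : Bool := c == '.' || c == ',' || c == ';' || c == ':' || c == '!' || c == '?'
def pvRstripPunct (s : String) : String := String.ofList ((s.toList.reverse.dropWhile pvIsPunct).reverse)

-- ===== PORT A =====
-- inner word loop of A: line_tags accumulated left to right
def pvAWordStep (lt : List String) (word : String) : List String :=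
  if PySem.Str.startswith word "@" then
    let tag := pvRstripPunct (PySem.Str.slice word (some 1) none)   -- word[1:]
    if tag ≠ "" ∧ tag.toList.any PySem.Chars.isalnum then lt ++ [PySem.Str.lower tag] else lt
  else lt

-- the 'for line in reversed(lines)' loop: argument is the reversed line list; returns final 'tags'
def pvALoop : List String → List String
  | [] => []
  | line :: rest =>
    let line := PySem.Str.strip line
    if line = "" then pvALoop rest          -- continue
    else
      let words := PySem.Str.split₀ line
      let line_tags := words.foldl pvAWordStep []
      if line_tags ≠ [] then line_tags.reverse        -- tags.extend(reversed(line_tags)); break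
      else if PySem.Str.startswith line "#" then []   -- break
      else []                                         -- break

def extract_tags_from_end_of_content (content : String) : String :=
  if content = "" then ""
  else
    let lines := pvSplitNL content
    let tags := pvALoop lines.reverse
    PySem.Str.join ", " tags.reverse

-- ===== PORT B =====
def pvLastNonemptyLine (content : String) : String :=
  (pvSplitNL content).foldl
    (fun last raw => let stripped := PySem.Str.strip raw; if stripped = "" then last else stripped) ""

def pvTagOf (word : String) : Option String :=
  if PySem.Str.startswith word "@" then
    let tag := pvRstripPunct (PySem.Str.slice word (some 1) none)
    if tag ≠ "" ∧ tag.toList.any PySem.Chars.isalnum then some (PySem.Str.lower tag) else none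
  else none

def extract_tags_from_end_of_content_alt (content : String) : String :=
  PySem.Str.join ", "
    (((PySem.Str.split₀ (pvLastNonemptyLine content)).map pvTagOf).filterMap id)

-- ===== PRECONDITION & SPEC =====
def Spec_extract_tags_from_end_of_content (content : String) (out : String) : Prop := out = extract_tags_from_end_of_content_alt content
instance (content : String) (out : String) : Decidable (Spec_extract_tags_from_end_of_content content out) := by unfold Spec_extract_tags_from_end_of_content; infer_instance

-- ===== CLAIM (what is proved, stated in full; the proofs are below) =====
def Claim_equal_extract_tags_from_end_of_content : Prop := ∀ (content : String), Dom_extract_tags_from_end_of_content content → Spec_extract_tags_from_end_of_content content (extract_tags_from_end_of_content content)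

-- ===== LEMMAS AND PROOFS =====

-- A's word step appends exactly what B's pvTagOf yields
theorem pvAWordStep_eq (lt : List String) (w : String) :
    pvAWordStep lt w = lt ++ (pvTagOf w).toList := by
  unfold pvAWordStep pvTagOf
  by_cases h1 : PySem.Chars.startswith w.toList ['@'] = true
  · by_cases h2 : pvRstripPunct (PySem.Str.slice w (some 1) none) = ""
    · simp [h1, h2]
    · by_cases h3 : (pvRstripPunct (PySem.Str.slice w (some 1) none)).toList.any PySem.Chars.isalnum = true
      · simp [h1, h2, h3]
      · simp [h1, h2, h3]
  · simp [h1]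

-- A's inner word loop equals B's filter-map
theorem lineTags_eq (ws : List String) (acc : List String) :
    ws.foldl pvAWordStep acc = acc ++ ws.filterMap pvTagOf := by
  induction ws generalizing acc with
  | nil => simp
  | cons w ws ih =>
    simp only [List.foldl_cons, List.filterMap_cons, ih, pvAWordStep_eq]
    cases pvTagOf w <;> simp

-- result of A's reversed-line loop, characterised by B's forward fold
theorem pvALoop_rev (ls : List String) :
    pvALoop ls.reverse =
      if ls.foldl
          (fun last raw => let stripped := PySem.Str.strip raw; if stripped = "" then last else stripped) "" = ""
      then []
      else ((PySem.Str.split₀ (ls.foldl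
          (fun last raw => let stripped := PySem.Str.strip raw; if stripped = "" then last else stripped) "")).filterMap pvTagOf).reverse := by
  induction ls using List.reverseRecOn with
  | nil => simp [pvALoop]
  | append_singleton ls x ih =>
    simp only [List.reverse_append, List.reverse_singleton, List.singleton_append,
      List.foldl_append, List.foldl_cons, List.foldl_nil]
    unfold pvALoop
    by_cases hx : PySem.Str.strip x = ""
    · simpa [hx] using ih
    · simp only [hx, lineTags_eq, List.nil_append]
      split_ifs with h1 h2 <;> simp_all

theorem pvALoop_content (content : String) :
    pvALoop (pvSplitNL content).reverse =
      if pvLastNonemptyLine content = "" then []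
      else ((PySem.Str.split₀ (pvLastNonemptyLine content)).filterMap pvTagOf).reverse := by
  simpa [pvLastNonemptyLine] using pvALoop_rev (pvSplitNL content)

-- ===== VERDICT =====
theorem extract_tags_from_end_of_content_spec : Claim_equal_extract_tags_from_end_of_content := by
  intro content _
  unfold Spec_extract_tags_from_end_of_content extract_tags_from_end_of_content
    extract_tags_from_end_of_content_alt
  by_cases hc : content = ""
  · subst hc; decide
  · simp only [hc, if_false, pvALoop_content]
    by_cases hL : pvLastNonemptyLine content = ""
    · rw [if_pos hL, hL]; decide
    · rw [if_neg hL]; simp [List.filterMap_map]
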